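-- pv_equiv track=rewrite | github.com/CjBlobby/Python-Code | Udemy excercises/Function Practice excercises.py | summer_of_69
-- ===== SOURCE A (Python) =====
-- def summer_of_69(array1):
--     x = True
--     total = 0
--     for num in array1:
--         if num == 6:
--             x = False
--         if x:
--             total += num
--         if num == 9:
--             x = True
--     return total
-- ===== SOURCE B (Python) =====
-- def summer_of_69(array1):
--     it = iter(array1)
--     total = 0
--     for num in it:
--         if num == 6:
--             for skip in it:
--                 if skip == 9:
--                     break
--         else:
--             total += num
--     return total
-- ===== Notes on version B (the rewrite author's own statement) =====
-- stated objective: alternative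
-- what changed: Replaces the carried boolean skip-flag with a shared iterator: on seeing a 6 an inner loop drains the iterator up to and including the next 9, so the main loop never tracks state.
import Mathlib
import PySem

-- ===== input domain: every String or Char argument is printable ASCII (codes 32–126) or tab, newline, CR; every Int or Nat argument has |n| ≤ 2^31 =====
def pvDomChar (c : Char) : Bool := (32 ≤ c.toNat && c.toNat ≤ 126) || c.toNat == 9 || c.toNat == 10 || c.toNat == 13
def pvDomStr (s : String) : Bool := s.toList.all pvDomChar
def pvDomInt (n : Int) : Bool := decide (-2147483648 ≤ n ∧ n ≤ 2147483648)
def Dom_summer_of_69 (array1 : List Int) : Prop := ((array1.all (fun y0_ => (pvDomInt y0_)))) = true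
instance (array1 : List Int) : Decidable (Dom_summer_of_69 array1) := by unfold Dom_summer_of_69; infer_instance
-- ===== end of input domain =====

-- B replaces A's carried boolean skip-flag by iterator consumption (an inner drain loop); return values proved equal.

-- ===== PORT A =====
-- A's for-loop carrying state (x, total), as structural recursion over the list.
def summer69Loop (array1 : List Int) (x : Bool) (total : Int) : Int :=
  match array1 with
  | [] => total
  | num :: rest =>
    let x1 := if num = 6 then false else x
    let total1 := if x1 then total + num else total
    let x2 := if num = 9 then true else x1
    summer69Loop rest x2 total1

def summer_of_69 (array1 : List Int) : Int := summer69Loop array1 true 0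

-- ===== PORT B =====
-- the inner `for skip in it: if skip == 9: break` — drains up to and including the first 9
def altDrain (l : List Int) : List Int :=
  match l with
  | [] => []
  | skip :: rest => if skip = 9 then rest else altDrain rest

theorem altDrain_length_le (l : List Int) : (altDrain l).length ≤ l.length := by
  induction l with
  | nil => simp [altDrain]
  | cons a rest ih => by_cases h : a = 9 <;> simp [altDrain, h] <;> omega

-- the main `for num in it` loop over the shared iterator
def altGo (l : List Int) (total : Int) : Int :=
  match l with
  | [] => total
  | num :: rest =>
    if num = 6 then altGo (altDrain rest) total
    else altGo rest (total + num)
termination_by l.length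
decreasing_by
  · exact Nat.lt_succ_of_le (altDrain_length_le rest)
  · exact Nat.lt_succ_self _

def summer_of_69_alt (array1 : List Int) : Int := altGo array1 0

-- ===== PRECONDITION & SPEC =====
def Spec_summer_of_69 (array1 : List Int) (out : Int) : Prop := out = summer_of_69_alt array1
instance (array1 : List Int) (out : Int) : Decidable (Spec_summer_of_69 array1 out) := by unfold Spec_summer_of_69; infer_instance

-- ===== CLAIM (what is proved, stated in full; the proofs are below) =====
def Claim_equal_summer_of_69 : Prop := ∀ (array1 : List Int), Dom_summer_of_69 array1 → Spec_summer_of_69 array1 (summer_of_69 array1)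

-- ===== LEMMAS AND PROOFS =====

-- while the flag is false, A adds nothing and leaves the skip state exactly at the first 9: that is B's drain
theorem summer69Loop_false (l : List Int) (total : Int) :
    summer69Loop l false total = summer69Loop (altDrain l) true total := by
  induction l generalizing total with
  | nil => simp [summer69Loop, altDrain]
  | cons num rest ih =>
    by_cases h9 : num = 9
    · subst h9; simp [summer69Loop, altDrain]
    · by_cases h6 : num = 6 <;> simp [summer69Loop, altDrain, h6, h9, ih]

theorem summer69Loop_eq_altGo (l : List Int) (total : Int) :
    summer69Loop l true total = altGo l total := by
  induction l, total using altGo.induct with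
  | case1 total => simp [summer69Loop, altGo]
  | case2 total rest ih =>
    rw [altGo]
    norm_num [summer69Loop]
    rw [summer69Loop_false, ih]
  | case3 total num rest h6 ih =>
    rw [altGo]
    simp only [if_neg h6]
    by_cases h9 : num = 9
    · subst h9; simp [summer69Loop, h6, ih]
    · simp [summer69Loop, h6, h9, ih]

-- ===== VERDICT (by name: the statement is the Claim_ definition above) =====
theorem summer_of_69_spec : Claim_equal_summer_of_69 := by
  intro array1 _
  unfold Spec_summer_of_69 summer_of_69 summer_of_69_alt
  exact summer69Loop_eq_altGo array1 0
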